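-- pv_equiv track=rewrite | github.com/khoi/collatz-conjecture | main.py | calculate_step
-- ===== SOURCE A (Python) =====
-- def calculate_step(n):
--     assert n >= 1, "n must be >= 1"
--     count = 0
--     peak = 0
--     while n != 1:
--         count += 1
--         if n % 2 == 0:
--             n = n // 2
--         else:
--             n = 3 * n + 1
--         if n > peak:
--             peak = n
--     return count, peak
-- ===== SOURCE B (Python) =====
-- def calculate_step(n):
--     assert n >= 1, "n must be >= 1"
--     count = 0
--     peak = 0
--     while n != 1:
--         if n % 2 == 1:
--             n = 3 * n + 1
--             count += 1
--             if n > peak: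
--                 peak = n
--         # n is now even: strip all factors of two in one bulk step.
--         tz = (n & -n).bit_length() - 1
--         half = n >> 1
--         if half > peak:
--             peak = half
--         count += tz
--         n >>= tz
--     return count, peak
-- ===== Notes on version B (the rewrite author's own statement) =====
-- stated objective: alternative
-- what changed: B strips all factors of two per iteration in one bulk step computed with the bit trick (n & -n).bit_length() - 1, instead of A's one halving per loop iteration.
import Mathlib
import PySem

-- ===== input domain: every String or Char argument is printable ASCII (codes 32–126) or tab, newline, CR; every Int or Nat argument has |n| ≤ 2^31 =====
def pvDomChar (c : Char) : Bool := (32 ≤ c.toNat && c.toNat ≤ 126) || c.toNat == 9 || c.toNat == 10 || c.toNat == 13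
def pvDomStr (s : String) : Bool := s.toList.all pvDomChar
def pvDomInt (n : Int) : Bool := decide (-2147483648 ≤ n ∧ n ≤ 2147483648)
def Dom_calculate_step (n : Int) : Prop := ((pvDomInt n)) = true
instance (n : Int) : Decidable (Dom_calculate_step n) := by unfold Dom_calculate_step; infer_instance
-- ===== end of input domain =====

-- B replaces A's one-halving-per-iteration loop by bulk stripping of all factors of two
-- per iteration, computed with the bit trick (n & -n).bit_length() - 1 (objective: alternative).
-- Both loops are ported with a fuel parameter counting A-steps (100000 exceeds the Collatz
-- step count of every n with |n| ≤ 2^31); the fuel-exhausted branch is unreachable on Dom.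

-- ===== PORT A =====
def pvStep (n : Int) : Int :=
  if PySem.Int.mod n 2 = 0 then PySem.Int.floordiv n 2 else 3 * n + 1

def pvLoopA (fuel : Nat) (n count peak : Int) : Int × Int :=
  if n = 1 then (count, peak)
  else match fuel with
    | 0 => (count, peak)
    | f + 1 =>
      let n' := pvStep n
      pvLoopA f n' (count + 1) (if n' > peak then n' else peak)

def calculate_step (n : Int) : Int × Int := pvLoopA 100000 n 0 0

-- ===== PORT B =====
-- Python's `(n & -n).bit_length() - 1` (index of the lowest set bit), via PySem's exact band/bitLength.
def pvTzB (n : Int) : Nat := PySem.Int.bitLength (PySem.Int.band n (-n)) - 1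

-- the fuel is budgeted in A-steps: an iteration consumes 1 per odd step plus one per stripped
-- factor of two (capped by the remaining fuel), so exhaustion behaviour matches pvLoopA's.
def pvLoopB (fuel : Nat) (n count peak : Int) : Int × Int :=
  match fuel with
  | 0 => (count, peak)  -- fuel exhausted; unreachable on the admitted domain
  | f + 1 =>
    if n = 1 then (count, peak)
    else
      if PySem.Int.mod n 2 = 1 then
        if min (pvTzB (3 * n + 1)) f = 0 then
          (count + 1, if 3 * n + 1 > peak then 3 * n + 1 else peak)
        else
          pvLoopB (f - min (pvTzB (3 * n + 1)) f) ((3 * n + 1) >>> min (pvTzB (3 * n + 1)) f)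
            (count + 1 + ((min (pvTzB (3 * n + 1)) f : Nat) : Int))
            (if (3 * n + 1) >>> (1 : Nat) > (if 3 * n + 1 > peak then 3 * n + 1 else peak)
             then (3 * n + 1) >>> (1 : Nat) else (if 3 * n + 1 > peak then 3 * n + 1 else peak))
      else
        if min (pvTzB n) (f + 1) = 0 then (count, peak)
        else
          pvLoopB (f + 1 - min (pvTzB n) (f + 1)) (n >>> min (pvTzB n) (f + 1))
            (count + ((min (pvTzB n) (f + 1) : Nat) : Int))
            (if n >>> (1 : Nat) > peak then n >>> (1 : Nat) else peak)
  termination_by fuel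
  decreasing_by all_goals omega

def calculate_step_alt (n : Int) : Int × Int := pvLoopB 100000 n 0 0

-- ===== PRECONDITION & SPEC =====
-- Pre_ excludes non-positive inputs, on which Python A's leading assert raises AssertionError.
def Pre_calculate_step (n : Int) : Prop := 1 ≤ n
instance (n : Int) : Decidable (Pre_calculate_step n) := by unfold Pre_calculate_step; infer_instance
def pvWitness_calculate_step : Int := (6)

def Spec_calculate_step (n : Int) (out : Int × Int) : Prop := out = calculate_step_alt n
instance (n : Int) (out : Int × Int) : Decidable (Spec_calculate_step n out) := by unfold Spec_calculate_step; infer_instance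

-- ===== CLAIM (what is proved, stated in full; the proofs are below) =====
def Claim_equal_calculate_step : Prop := ∀ (n : Int), Dom_calculate_step n → Pre_calculate_step n → Spec_calculate_step n (calculate_step n)

-- ===== LEMMAS AND PROOFS =====

-- trailing-zero count of a positive natural
def pvTzN (m : Nat) : Nat :=
  if m % 2 = 1 ∨ m = 0 then 0 else pvTzN (m / 2) + 1
  termination_by m
  decreasing_by omega

theorem pvTzN_odd (m : Nat) (h : m % 2 = 1) : pvTzN m = 0 := by
  rw [pvTzN]; simp [h]

theorem pvTzN_even (m : Nat) (h : m % 2 = 0) (h0 : m ≠ 0) : pvTzN m = pvTzN (m / 2) + 1 := by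
  rw [pvTzN]; simp [h, h0]

-- m & (m-1) clears the lowest set bit
theorem pvLand_odd (m : Nat) (h : m % 2 = 1) : m &&& (m - 1) = m - 1 := by
  have hdiv : (m &&& (m - 1)) / 2 = m / 2 := by
    rw [Nat.and_div_two]
    have : (m - 1) / 2 = m / 2 := by omega
    rw [this, Nat.and_self]
  have hmod : (m &&& (m - 1)) % 2 = 0 := by
    have h1 : (m - 1) % 2 = 0 := by omega
    rw [← Nat.and_one_is_mod, Nat.and_assoc, Nat.and_one_is_mod, h1, Nat.and_zero]
  omega

theorem pvLand_even (m : Nat) (h : m % 2 = 0) : m &&& (m - 1) = 2 * ((m / 2) &&& (m / 2 - 1)) := by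
  rcases Nat.eq_zero_or_pos m with h0 | h0
  · simp [h0]
  have hdiv : (m &&& (m - 1)) / 2 = (m / 2) &&& (m / 2 - 1) := by
    rw [Nat.and_div_two]
    have : (m - 1) / 2 = m / 2 - 1 := by omega
    rw [this]
  have hmod : (m &&& (m - 1)) % 2 = 0 := by
    rw [← Nat.and_one_is_mod, Nat.and_comm m (m - 1), Nat.and_assoc, Nat.and_one_is_mod, h,
      Nat.and_zero]
  omega

-- m - (m & (m-1)) = the lowest set bit = 2 ^ (trailing zeros)
theorem pvLowbit_eq (m : Nat) (h0 : 0 < m) : m - (m &&& (m - 1)) = 2 ^ pvTzN m := by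
  induction m using Nat.strong_induction_on with
  | _ m ih =>
    rcases Nat.even_or_odd m with he | ho
    · have h2 : m % 2 = 0 := Nat.even_iff.mp he
      have hm2 : 0 < m / 2 := by omega
      have := ih (m / 2) (by omega) hm2
      rw [pvLand_even m h2, pvTzN_even m h2 (by omega), pow_succ]
      have hle : (m / 2) &&& (m / 2 - 1) ≤ m / 2 := Nat.and_le_left
      omega
    · have h2 : m % 2 = 1 := Nat.odd_iff.mp ho
      rw [pvLand_odd m h2, pvTzN_odd m h2]
      omega

-- Python's n & -n on a positive n, through PySem's exact band
theorem pvBand_neg (m : Nat) (h0 : 0 < m) :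
    PySem.Int.band (m : Int) (-(m : Int)) = ((m - (m &&& (m - 1)) : Nat) : Int) := by
  have h1 : (0 : Int) ≤ (m : Int) := by positivity
  have h2 : ¬ (0 : Int) ≤ -(m : Int) := by omega
  simp only [PySem.Int.band, h1, h2, if_true, if_false]
  have e1 : ((m : Int)).toNat = m := Int.toNat_natCast m
  have e2 : (-(-(m : Int)) - 1).toNat = m - 1 := by omega
  rw [e1, e2]

theorem pvBitLength_pow (k : Nat) : PySem.Int.bitLength ((2 ^ k : Nat) : Int) = k + 1 := by
  induction k with
  | zero => decide
  | succ k ih =>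
    rw [PySem.Int.bitLength_natCast (m := 2 ^ (k + 1)) (by positivity)]
    have : 2 ^ (k + 1) / 2 = 2 ^ k := by
      rw [pow_succ]; omega
    rw [this, ih]

theorem pvTzB_natCast (m : Nat) (h0 : 0 < m) : pvTzB (m : Int) = pvTzN m := by
  unfold pvTzB
  rw [pvBand_neg m h0, pvLowbit_eq m h0, pvBitLength_pow]
  omega

theorem pvTz_le (m : Nat) (h0 : 0 < m) : 2 ^ pvTzN m ≤ m := by
  have := pvLowbit_eq m h0
  omega

theorem pvLoopA_zero (n c p : Int) : pvLoopA 0 n c p = (c, p) := by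
  rw [pvLoopA]; split <;> rfl

theorem pvStep_natCast_even (m : Nat) (h : m % 2 = 0) :
    pvStep (m : Int) = ((m / 2 : Nat) : Int) := by
  unfold pvStep
  have hm : PySem.Int.mod (m : Int) 2 = 0 := by
    rw [PySem.Int.mod_eq_emod_of_pos (by omega)]
    omega
  rw [if_pos hm, PySem.Int.floordiv_eq_ediv_of_pos (by omega)]
  omega

theorem pvStep_natCast_odd (m : Nat) (h : m % 2 = 1) :
    pvStep (m : Int) = ((3 * m + 1 : Nat) : Int) := by
  unfold pvStep
  have hm : PySem.Int.mod (m : Int) 2 = 1 := by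
    rw [PySem.Int.mod_eq_emod_of_pos (by omega)]
    omega
  rw [if_neg (by omega)]
  push_cast
  ring

theorem pvShift_natCast (m s : Nat) : ((m : Int) >>> s) = ((m >>> s : Nat) : Int) := by
  exact Int.mem_toNat?.mp rfl

-- A's loop performs min (tz m) g halvings of an even m as one bulk step
theorem pvHalveA (g : Nat) : ∀ (m : Nat) (c p : Int), 2 ≤ m → m % 2 = 0 →
    pvLoopA g (m : Int) c p =
      (if min (pvTzN m) g = 0 then (c, p)
       else pvLoopA (g - min (pvTzN m) g) ((m >>> min (pvTzN m) g : Nat) : Int)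
              (c + ((min (pvTzN m) g : Nat) : Int))
              (if ((m >>> 1 : Nat) : Int) > p then ((m >>> 1 : Nat) : Int) else p)) := by
  induction g with
  | zero =>
    intro m c p hm he
    rw [if_pos (Nat.min_zero _), pvLoopA, if_neg (by omega)]
  | succ h ih =>
    intro m c p hm he
    have htz : pvTzN m = pvTzN (m / 2) + 1 := pvTzN_even m he (by omega)
    have hs1 : m >>> 1 = m / 2 := by
      rw [Nat.shiftRight_eq_div_pow, pow_one]
    have hstep : pvLoopA (h + 1) (m : Int) c p =
        pvLoopA h ((m / 2 : Nat) : Int) (c + 1)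
          (if ((m / 2 : Nat) : Int) > p then ((m / 2 : Nat) : Int) else p) := by
      rw [pvLoopA, if_neg (by omega), pvStep_natCast_even m he]
    rw [hstep]
    rcases Nat.eq_zero_or_pos (pvTzN (m / 2)) with ht0 | htpos
    · -- m/2 is odd: exactly one halving
      have hmin : min (pvTzN m) (h + 1) = 1 := by rw [htz, ht0]; omega
      rw [hmin, Nat.add_sub_cancel, Nat.cast_one, hs1]
      norm_num
    · -- m/2 is still even: recurse with the IH
      have hm2 : m / 2 % 2 = 0 := by
        by_contra hodd
        have h1' : m / 2 % 2 = 1 := by omega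
        rw [pvTzN_odd _ h1'] at htpos
        omega
      have hm4 : 2 ≤ m / 2 := by omega
      rw [ih (m / 2) (c + 1) _ hm4 hm2]
      have hs2 : (m / 2) >>> 1 = m / 2 / 2 := by
        rw [Nat.shiftRight_eq_div_pow, pow_one]
      rcases Nat.eq_zero_or_pos h with hh0 | hhpos
      · -- fuel exhausted after the single halving
        subst hh0
        rw [if_pos (Nat.min_zero _)]
        have hmin : min (pvTzN m) 1 = 1 := by rw [htz]; omega
        rw [hmin, Nat.sub_self, Nat.cast_one, pvLoopA_zero, hs1]
        norm_num
      · have hminpos : 1 ≤ min (pvTzN m) (h + 1) := by rw [htz]; omega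
        have hmin' : min (pvTzN (m / 2)) h = min (pvTzN m) (h + 1) - 1 := by
          rw [htz]; omega
        have hne : ¬ (min (pvTzN (m / 2)) h = 0) := by omega
        have hne2 : ¬ (min (pvTzN m) (h + 1) = 0) := by omega
        rw [if_neg hne, if_neg hne2]
        have e1 : h - min (pvTzN (m / 2)) h = h + 1 - min (pvTzN m) (h + 1) := by omega
        have e2 : (m / 2) >>> min (pvTzN (m / 2)) h = m >>> min (pvTzN m) (h + 1) := by
          rw [hmin', Nat.shiftRight_eq_div_pow, Nat.shiftRight_eq_div_pow,
            Nat.div_div_eq_div_mul, ← pow_succ']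
          congr 2
          omega
        have e3 : c + 1 + ((min (pvTzN (m / 2)) h : Nat) : Int)
            = c + ((min (pvTzN m) (h + 1) : Nat) : Int) := by
          rw [hmin']
          omega
        have e4 : (if (((m / 2) >>> 1 : Nat) : Int) > (if ((m / 2 : Nat) : Int) > p then ((m / 2 : Nat) : Int) else p)
                     then (((m / 2) >>> 1 : Nat) : Int)
                     else (if ((m / 2 : Nat) : Int) > p then ((m / 2 : Nat) : Int) else p))
            = (if ((m >>> 1 : Nat) : Int) > p then ((m >>> 1 : Nat) : Int) else p) := by
          rw [hs2, hs1]
          have hle : m / 2 / 2 ≤ m / 2 := Nat.div_le_self _ _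
          split_ifs <;> omega
        rw [e1, e2, e3, e4]

-- B's loop equals A's loop on positive inputs and any fuel
theorem pvLoopB_eq (fuel : Nat) : ∀ (m : Nat) (c p : Int), 1 ≤ m →
    pvLoopB fuel (m : Int) c p = pvLoopA fuel (m : Int) c p := by
  induction fuel using Nat.strong_induction_on with
  | _ fuel ih =>
    intro m c p hm1
    by_cases h1 : m = 1
    · subst h1
      cases fuel <;> rw [pvLoopB, pvLoopA.eq_def] <;> norm_num
    · have hne1 : ¬ ((m : Int) = 1) := by omega
      match fuel with
      | 0 =>
        rw [pvLoopB, pvLoopA.eq_def]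
        simp [hne1]
      | f + 1 =>
        rw [pvLoopB, if_neg hne1]
        rcases Nat.even_or_odd m with he | ho
        · -- even input: bulk-strip branch only
          have h2 : m % 2 = 0 := Nat.even_iff.mp he
          have hmod : ¬ (PySem.Int.mod (m : Int) 2 = 1) := by
            rw [PySem.Int.mod_eq_emod_of_pos (by omega)]
            omega
          rw [if_neg hmod]
          have hm2 : 2 ≤ m := by omega
          rw [pvTzB_natCast m (by omega)]
          rw [pvHalveA (f + 1) m c p hm2 h2]
          have hle : 2 ^ pvTzN m ≤ m := pvTz_le m (by omega)
          by_cases hs0 : min (pvTzN m) (f + 1) = 0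
          · rw [if_pos hs0, if_pos hs0]
          · rw [if_neg hs0, if_neg hs0]
            rw [pvShift_natCast m (min (pvTzN m) (f + 1)), pvShift_natCast m 1]
            set s := min (pvTzN m) (f + 1) with hsdef
            have hfuel : f + 1 - s < f + 1 := by omega
            have hpos : 1 ≤ m >>> s := by
              rw [Nat.shiftRight_eq_div_pow]
              have hps : 2 ^ s ≤ 2 ^ pvTzN m := Nat.pow_le_pow_right (by omega) (by omega)
              exact (Nat.one_le_div_iff (Nat.two_pow_pos s)).mpr (by omega)
            exact ih (f + 1 - s) hfuel (m >>> s) _ _ hpos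
        · -- odd input: 3n+1 step, then bulk strip
          have h2 : m % 2 = 1 := Nat.odd_iff.mp ho
          have hmod : PySem.Int.mod (m : Int) 2 = 1 := by
            rw [PySem.Int.mod_eq_emod_of_pos (by omega)]
            omega
          rw [if_pos hmod]
          have hcast : 3 * (m : Int) + 1 = ((3 * m + 1 : Nat) : Int) := by push_cast; ring
          have hAstep : pvLoopA (f + 1) (m : Int) c p =
              pvLoopA f ((3 * m + 1 : Nat) : Int) (c + 1)
                (if ((3 * m + 1 : Nat) : Int) > p then ((3 * m + 1 : Nat) : Int) else p) := by
            rw [pvLoopA, if_neg hne1, pvStep_natCast_odd m h2]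
          rw [hAstep]
          have h31 : (3 * m + 1) % 2 = 0 := by omega
          have h32 : 2 ≤ 3 * m + 1 := by omega
          rw [pvHalveA f (3 * m + 1) (c + 1) _ h32 h31]
          simp only [hcast]
          rw [pvTzB_natCast (3 * m + 1) (by omega)]
          have hle : 2 ^ pvTzN (3 * m + 1) ≤ 3 * m + 1 := pvTz_le (3 * m + 1) (by omega)
          by_cases hs0 : min (pvTzN (3 * m + 1)) f = 0
          · rw [if_pos hs0, if_pos hs0]
          · rw [if_neg hs0, if_neg hs0]
            rw [pvShift_natCast (3 * m + 1) (min (pvTzN (3 * m + 1)) f),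
              pvShift_natCast (3 * m + 1) 1]
            set s := min (pvTzN (3 * m + 1)) f with hsdef
            have hfuel : f - s < f + 1 := by omega
            have hpos : 1 ≤ (3 * m + 1) >>> s := by
              rw [Nat.shiftRight_eq_div_pow]
              have hps : 2 ^ s ≤ 2 ^ pvTzN (3 * m + 1) := Nat.pow_le_pow_right (by omega) (by omega)
              exact (Nat.one_le_div_iff (Nat.two_pow_pos s)).mpr (by omega)
            exact ih (f - s) hfuel ((3 * m + 1) >>> s) _ _ hpos

theorem calculate_step_spec : Claim_equal_calculate_step := by
  intro n _ hpre
  unfold Pre_calculate_step at hpre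
  unfold Spec_calculate_step calculate_step calculate_step_alt
  have hm : n = ((n.toNat : Nat) : Int) := by omega
  rw [hm, pvLoopB_eq 100000 n.toNat 0 0 (by omega)]
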